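-- pv_equiv track=rewrite | github.com/Gaoyagi/PokerBot | texasHold.py | num_of_a_kind
-- ===== SOURCE A (Python) =====
-- def num_of_a_kind(hand):
--     value = []
--     alreadyFound = []
--     hand.sort()
--     #go through every value in the hand to find duplicates
--     for x in range(len(hand)):
--         sameCard = 0
--         #avoid finding __ of a kind for the same value
--         if hand[x] not in alreadyFound:
--             for y in range(len(hand)):
--                 if y!=x and hand[x] == hand[y]:
--                     sameCard+=1
--         alreadyFound.append(hand[x])    #add that number to list of numbers you dont need to use anymore
--         if sameCard == 3:
--             value.append(("quad", hand[x]))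
--             return value
--         elif sameCard == 2:
--             value.append(("triple", hand[x]))
--         elif sameCard == 1:
--             value.append(("pair", hand[x]))
--     if len(value) == 0:
--         value.append(("high card", hand[len(hand)-1]))
--
--     return value
-- ===== SOURCE B (Python) =====
-- def num_of_a_kind(hand):
--     hand.sort()
--     counts = {}
--     for v in hand:
--         counts[v] = counts.get(v, 0) + 1
--     value = []
--     for v, c in counts.items():
--         if c == 4:
--             value.append(("quad", v))
--             return value
--         elif c == 3:
--             value.append(("triple", v))
--         elif c == 2:
--             value.append(("pair", v))
--     if len(value) == 0:
--         value.append(("high card", hand[-1]))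
--     return value
-- ===== Notes on version B (the rewrite author's own statement) =====
-- stated objective: faster
-- what changed: Replaces the quadratic nested index scan plus alreadyFound membership list with a single-pass frequency dictionary over the sorted hand, then one loop over the distinct values.
import Mathlib
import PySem

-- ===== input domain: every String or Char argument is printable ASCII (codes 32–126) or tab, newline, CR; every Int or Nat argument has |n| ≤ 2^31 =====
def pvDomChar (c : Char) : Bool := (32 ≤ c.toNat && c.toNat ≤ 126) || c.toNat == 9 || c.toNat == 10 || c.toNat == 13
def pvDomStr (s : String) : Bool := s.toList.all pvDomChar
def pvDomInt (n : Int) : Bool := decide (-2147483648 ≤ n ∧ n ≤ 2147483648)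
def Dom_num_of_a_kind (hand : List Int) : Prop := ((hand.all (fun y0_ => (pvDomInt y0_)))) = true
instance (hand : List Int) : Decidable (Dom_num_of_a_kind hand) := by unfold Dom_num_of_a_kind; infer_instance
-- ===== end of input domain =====

-- B replaces A's quadratic nested index scan + alreadyFound list with a one-pass frequency
-- dictionary over the sorted hand (asymptotically faster); like A, B sorts `hand` in place
-- (same mutation); the equivalence proved is about the return value.


-- ===== PORT A =====
-- inner `for y in range(len(hand)): if y!=x and hand[x]==hand[y]: sameCard+=1`
def pvSameCard (h : List Int) (x : Nat) : Int :=
  (List.range h.length).foldl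
    (fun sameCard y => if y ≠ x ∧ h.getD x 0 = h.getD y 0 then sameCard + 1 else sameCard) 0

-- the outer `for x in range(len(hand))`; `.inl` = the early `return value` on a quad
def pvALoop (h : List Int) : List Nat → List (String × Int) → List Int →
    List (String × Int) ⊕ List (String × Int)
  | [], value, _ => .inr value
  | x :: xs, value, found =>
    let hx := h.getD x 0
    let sameCard : Int := if hx ∈ found then 0 else pvSameCard h x
    let found' := found ++ [hx]
    if sameCard = 3 then .inl (value ++ [("quad", hx)])
    else if sameCard = 2 then pvALoop h xs (value ++ [("triple", hx)]) found'
    else if sameCard = 1 then pvALoop h xs (value ++ [("pair", hx)]) found'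
    else pvALoop h xs value found'

def num_of_a_kind (hand : List Int) : List (String × Int) :=
  let h := PySem.List.sorted hand id
  match pvALoop h (List.range h.length) [] [] with
  | .inl value => value
  | .inr value =>
    if value.length = 0 then value ++ [("high card", h.getD (h.length - 1) 0)] else value

-- ===== PORT B =====
-- the `for v, c in counts.items()` loop; `.inl` = the early `return value` on a quad
def pvBLoop : List (Int × Int) → List (String × Int) →
    List (String × Int) ⊕ List (String × Int)
  | [], value => .inr value
  | (v, c) :: rest, value =>
    if c = 4 then .inl (value ++ [("quad", v)])
    else if c = 3 then pvBLoop rest (value ++ [("triple", v)])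
    else if c = 2 then pvBLoop rest (value ++ [("pair", v)])
    else pvBLoop rest value

def num_of_a_kind_alt (hand : List Int) : List (String × Int) :=
  let h := PySem.List.sorted hand id
  let counts := h.foldl (fun d v => d.insert v (d.getD v 0 + 1)) PySem.Dict.empty
  match pvBLoop counts.items [] with
  | .inl value => value
  | .inr value =>
    if value.length = 0 then value ++ [("high card", (PySem.List.pyGet? h (-1)).getD 0)]
    else value

-- ===== PRECONDITION & SPEC =====
-- Pre_ excludes only the empty hand, on which A raises IndexError at hand[len(hand)-1].
def Pre_num_of_a_kind (hand : List Int) : Prop := hand ≠ []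
instance (hand : List Int) : Decidable (Pre_num_of_a_kind hand) := by
  unfold Pre_num_of_a_kind; infer_instance
def pvWitness_num_of_a_kind : List Int := [3, 3, 2, 2, 9]

def Spec_num_of_a_kind (hand : List Int) (out : List (String × Int)) : Prop :=
  out = num_of_a_kind_alt hand
instance (hand : List Int) (out : List (String × Int)) : Decidable (Spec_num_of_a_kind hand out) := by
  unfold Spec_num_of_a_kind; infer_instance

-- ===== CLAIM (what is proved, stated in full; the proofs are below) =====
def Claim_equal_num_of_a_kind : Prop := ∀ (hand : List Int), Dom_num_of_a_kind hand →
  Pre_num_of_a_kind hand → Spec_num_of_a_kind hand (num_of_a_kind hand)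

-- ===== LEMMAS AND PROOFS =====

-- element-level reformulation of A's outer loop (sameCard becomes cnt e - 1)
def pvELoop (cnt : Int → Nat) : List Int → List (String × Int) → List Int →
    List (String × Int) ⊕ List (String × Int)
  | [], value, _ => .inr value
  | e :: es, value, found =>
    let sameCard : Int := if e ∈ found then 0 else (cnt e : Int) - 1
    let found' := found ++ [e]
    if sameCard = 3 then .inl (value ++ [("quad", e)])
    else if sameCard = 2 then pvELoop cnt es (value ++ [("triple", e)]) found'
    else if sameCard = 1 then pvELoop cnt es (value ++ [("pair", e)]) found'
    else pvELoop cnt es value found'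

lemma pv_foldl_if_count (p : Nat → Prop) [DecidablePred p] :
    ∀ (l : List Nat) (a : Int),
      l.foldl (fun s y => if p y then s + 1 else s) a = a + (l.countP (fun y => decide (p y)) : Int) := by
  intro l
  induction l with
  | nil => intro a; simp
  | cons b l ih =>
    intro a
    by_cases hb : p b <;> simp [List.countP_cons, hb, ih] <;> push_cast <;> ring

lemma pv_countP_erase_self (P : Nat → Prop) [DecidablePred P] :
    ∀ (l : List Nat) (x : Nat), l.Nodup → x ∈ l → P x →
      l.countP (fun y => decide (y ≠ x ∧ P y)) = l.countP (fun y => decide (P y)) - 1 := by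
  intro l
  induction l with
  | nil => intro x _ hx; simp at hx
  | cons a l ih =>
    intro x hnd hx hP
    rcases List.nodup_cons.mp hnd with ⟨ha, hnd'⟩
    by_cases hax : a = x
    · subst hax
      have h1 : l.countP (fun y => decide (y ≠ a ∧ P y)) = l.countP (fun y => decide (P y)) := by
        apply List.countP_congr
        intro y hy
        have hya : y ≠ a := fun h => ha (h ▸ hy)
        simp [hya]
      rw [List.countP_cons, List.countP_cons, h1]
      have e1 : decide (a ≠ a ∧ P a) = false := by simp
      have e2 : decide (P a) = true := by simp [hP]
      rw [e1, e2]
      simp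
    · have hx' : x ∈ l := by
        rcases List.mem_cons.mp hx with h | h
        · exact absurd h.symm hax
        · exact h
      have hpos : 0 < l.countP (fun y => decide (P y)) :=
        List.countP_pos_iff.mpr ⟨x, hx', by simp [hP]⟩
      rw [List.countP_cons, List.countP_cons, ih x hnd' hx' hP]
      have e1 : decide (a ≠ x ∧ P a) = decide (P a) := by simp [hax]
      rw [e1]
      by_cases hPa : P a
      · have e2 : decide (P a) = true := by simp [hPa]
        rw [e2]
        omega
      · have e2 : decide (P a) = false := by simp [hPa]
        rw [e2]
        omega

lemma pv_countP_range_eq_count (e : Int) :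
    ∀ (h : List Int), (List.range h.length).countP (fun y => decide (e = h.getD y 0)) = h.count e := by
  intro h
  induction h with
  | nil => simp
  | cons a t ih =>
    rw [show (a :: t).length = t.length + 1 from rfl, List.range_succ_eq_map]
    rw [List.countP_cons, List.countP_map]
    have h2 : (List.range t.length).countP
        ((fun y => decide (e = (a :: t).getD y 0)) ∘ Nat.succ) =
        (List.range t.length).countP (fun y => decide (e = t.getD y 0)) := by
      apply List.countP_congr
      intro y _
      rfl
    rw [h2, ih, List.count_cons]
    have h0 : (a :: t).getD 0 0 = a := rfl
    rw [h0]
    by_cases hae : a = e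
    · subst hae
      simp
    · have hea : ¬ (e = a) := fun h => hae h.symm
      simp [hae, hea]

lemma pv_sameCard_eq (h : List Int) (x : Nat) (hx : x < h.length) :
    pvSameCard h x = (h.count (h.getD x 0) : Int) - 1 := by
  unfold pvSameCard
  rw [pv_foldl_if_count (fun y => y ≠ x ∧ h.getD x 0 = h.getD y 0)]
  rw [pv_countP_erase_self (fun y => h.getD x 0 = h.getD y 0) _ x List.nodup_range
      (List.mem_range.mpr hx) rfl]
  rw [pv_countP_range_eq_count]
  have hpos : 0 < h.count (h.getD x 0) := by
    rw [List.getD_eq_getElem h 0 hx]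
    exact List.count_pos_iff.mpr (List.getElem_mem hx)
  omega

lemma pv_aloop_eq_eloop (h : List Int) :
    ∀ (xs : List Nat) (value : List (String × Int)) (found : List Int),
      (∀ x ∈ xs, x < h.length) →
      pvALoop h xs value found = pvELoop h.count (xs.map (fun x => h.getD x 0)) value found := by
  intro xs
  induction xs with
  | nil => intro value found _; rfl
  | cons x xs ih =>
    intro value found hmem
    have hx : x < h.length := hmem x (List.mem_cons_self)
    have hrest : ∀ y ∈ xs, y < h.length := fun y hy => hmem y (List.mem_cons_of_mem _ hy)
    simp only [pvALoop, pvELoop, List.map_cons]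
    rw [pv_sameCard_eq h x hx]
    by_cases hfound : h.getD x 0 ∈ found <;>
      simp only [hfound, if_true, if_false] <;> split_ifs <;>
        first
          | rfl
          | exact ih _ _ hrest

lemma pv_map_getD_range (h : List Int) :
    (List.range h.length).map (fun x => h.getD x 0) = h := by
  apply List.ext_getElem
  · simp
  · intro i h1 h2
    simp [List.getD_eq_getElem?_getD, List.getElem?_eq_getElem h2]

lemma pv_eloop_skip (v : Int) :
    ∀ (k : Nat) (cnt : Int → Nat) (t : List Int) (value : List (String × Int)) (found : List Int),
      v ∈ found →
      pvELoop cnt (List.replicate k v ++ t) value found =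
        pvELoop cnt t value (found ++ List.replicate k v) := by
  intro k
  induction k with
  | zero => intro cnt t value found _; simp
  | succ k ih =>
    intro cnt t value found hv
    have : List.replicate (k + 1) v ++ t = v :: (List.replicate k v ++ t) := by
      simp [List.replicate_succ]
    rw [this]
    simp only [pvELoop, hv, if_true]
    have h2 : v ∈ found ++ [v] := by simp
    rw [if_neg (by norm_num), if_neg (by norm_num), if_neg (by norm_num)]
    rw [ih cnt t value (found ++ [v]) h2]
    congr 1
    simp [List.replicate_succ]

lemma pv_foldl_add_cons (t : List Int) :
    ∀ (x : Int) (s : List Int), x ∉ t →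
      List.foldl PySem.Set.add (x :: s) t = x :: List.foldl PySem.Set.add s t := by
  induction t with
  | nil => intro x s _; rfl
  | cons a t ih =>
    intro x s hx
    have hax : a ≠ x := fun h => hx (h ▸ List.mem_cons_self)
    have hxt : x ∉ t := fun h => hx (List.mem_cons_of_mem _ h)
    by_cases hmem : a ∈ s
    · have e1 : PySem.Set.add (x :: s) a = x :: s := by
        simp [PySem.Set.add, hmem]
      have e2 : PySem.Set.add s a = s := by
        simp [PySem.Set.add, hmem]
      calc List.foldl PySem.Set.add (x :: s) (a :: t)
          = List.foldl PySem.Set.add (x :: s) t := by rw [List.foldl_cons, e1]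
        _ = x :: List.foldl PySem.Set.add s t := ih x s hxt
        _ = x :: List.foldl PySem.Set.add s (a :: t) := by rw [List.foldl_cons, e2]
    · have e1 : PySem.Set.add (x :: s) a = x :: (s ++ [a]) := by
        simp [PySem.Set.add, hmem, hax]
      have e2 : PySem.Set.add s a = s ++ [a] := by
        simp [PySem.Set.add, hmem]
      calc List.foldl PySem.Set.add (x :: s) (a :: t)
          = List.foldl PySem.Set.add (x :: (s ++ [a])) t := by rw [List.foldl_cons, e1]
        _ = x :: List.foldl PySem.Set.add (s ++ [a]) t := ih x (s ++ [a]) hxt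
        _ = x :: List.foldl PySem.Set.add s (a :: t) := by rw [List.foldl_cons, e2]

lemma pv_foldl_add_replicate (v : Int) :
    ∀ (k : Nat) (s : List Int), v ∈ s →
      List.foldl PySem.Set.add s (List.replicate k v) = s := by
  intro k
  induction k with
  | zero => intro s _; rfl
  | succ k ih =>
    intro s hv
    rw [List.replicate_succ]
    show List.foldl PySem.Set.add (PySem.Set.add s v) (List.replicate k v) = s
    have e : PySem.Set.add s v = s := by
      simp [PySem.Set.add, hv]
    rw [e, ih s hv]

lemma pv_ofList_group (c : Nat) (hc : 0 < c) (v : Int) (t : List Int) (hv : v ∉ t) :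
    PySem.Set.ofList (List.replicate c v ++ t) = v :: PySem.Set.ofList t := by
  obtain ⟨k, rfl⟩ : ∃ k, c = k + 1 := ⟨c - 1, by omega⟩
  show List.foldl PySem.Set.add PySem.Set.empty (List.replicate (k + 1) v ++ t) = _
  rw [List.replicate_succ]
  show List.foldl PySem.Set.add (PySem.Set.add PySem.Set.empty v) (List.replicate k v ++ t) = _
  have h1 : PySem.Set.add PySem.Set.empty v = [v] := rfl
  rw [h1, List.foldl_append, pv_foldl_add_replicate v k [v] (List.mem_singleton.mpr rfl)]
  exact pv_foldl_add_cons t v [] hv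

lemma pv_sorted_head_group (v : Int) :
    ∀ (s' : List Int), (v :: s').Pairwise (· ≤ ·) →
      ∃ t, v :: s' = List.replicate ((v :: s').count v) v ++ t ∧ v ∉ t ∧
        t.Pairwise (· ≤ ·) ∧ ∀ a ∈ t, a ∈ v :: s' := by
  intro s'
  induction s' with
  | nil =>
    intro _
    exact ⟨[], by simp, by simp, List.Pairwise.nil, by simp⟩
  | cons w s'' ih =>
    intro hp
    rcases List.pairwise_cons.mp hp with ⟨hvle, hp'⟩
    by_cases hwv : w = v
    · subst hwv
      obtain ⟨t, ht1, ht2, ht3, ht4⟩ := ih hp'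
      refine ⟨t, ?_, ht2, ht3, fun a ha => List.mem_cons_of_mem _ (ht4 a ha)⟩
      have hcnt : (w :: w :: s'').count w = (w :: s'').count w + 1 := by
        simp [List.count_cons]
      rw [hcnt, List.replicate_succ, List.cons_append, ← ht1]
    · have hvnot : v ∉ w :: s'' := by
        intro hvin
        rcases List.mem_cons.mp hvin with h | h
        · exact hwv h.symm
        · have h1 : v ≤ w := hvle w List.mem_cons_self
          have h2 : w ≤ v := (List.pairwise_cons.mp hp').1 v h
          exact hwv (le_antisymm h2 h1)
      have hcnt : (v :: w :: s'').count v = 1 := by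
        rw [List.count_cons]
        simp [List.count_eq_zero.mpr hvnot]
      exact ⟨w :: s'', by rw [hcnt]; simp, hvnot, hp', fun a ha => List.mem_cons_of_mem _ ha⟩

lemma pv_main :
    ∀ (n : Nat) (s : List Int) (cnt : Int → Nat) (value : List (String × Int)) (found : List Int),
      s.length ≤ n → s.Pairwise (· ≤ ·) →
      (∀ a ∈ s, a ∉ found) → (∀ e ∈ s, cnt e = s.count e) →
      pvELoop cnt s value found =
        pvBLoop ((PySem.Set.ofList s).map (fun k => (k, (s.count k : Int)))) value := by
  intro n
  induction n with
  | zero =>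
    intro s cnt value found hlen _ _ _
    have : s = [] := List.length_eq_zero_iff.mp (Nat.le_zero.mp hlen)
    subst this
    rfl
  | succ n ih =>
    intro s cnt value found hlen hsort hfresh hcnt
    match s, hsort, hfresh, hcnt, hlen with
    | [], _, _, _, _ => rfl
    | v :: s', hsort, hfresh, hcnt, hlen =>
      obtain ⟨t, hsplit, hvt, htsort, htsub⟩ := pv_sorted_head_group v s' hsort
      obtain ⟨c, hc⟩ : ∃ c, (v :: s').count v = c := ⟨_, rfl⟩
      rw [hc] at hsplit
      have hcpos : 0 < c := hc ▸ List.count_pos_iff.mpr List.mem_cons_self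
      have hs' : s' = List.replicate (c - 1) v ++ t := by
        have h1 : List.replicate c v ++ t = v :: (List.replicate (c - 1) v ++ t) := by
          obtain ⟨k, rfl⟩ : ∃ k, c = k + 1 := ⟨c - 1, by omega⟩
          simp [List.replicate_succ]
        have h2 := hsplit.trans h1
        exact (List.cons.injEq _ _ _ _ ▸ congrArg id h2 : _ ∧ _).2
      have hcount_t : ∀ e ∈ t, (v :: s').count e = t.count e := by
        intro e he
        have hev : e ≠ v := fun h => hvt (h ▸ he)
        rw [hsplit, List.count_append, List.count_replicate]
        simp
        intro h0
        exact absurd h0.symm hev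
      have hofl : PySem.Set.ofList (v :: s') = v :: PySem.Set.ofList t := by
        rw [hsplit]; exact pv_ofList_group c hcpos v t hvt
      have hmap : ((PySem.Set.ofList (v :: s')).map (fun k => (k, ((v :: s').count k : Int)))) =
          (v, (c : Int)) :: (PySem.Set.ofList t).map (fun k => (k, (t.count k : Int))) := by
        rw [hofl, List.map_cons, hc]
        congr 1
        apply List.map_congr_left
        intro k hk
        have hkt : k ∈ t := (PySem.Set.mem_ofList t k).mp hk
        rw [hcount_t k hkt]
      rw [hmap]
      have hvf : v ∉ found := hfresh v List.mem_cons_self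
      have hcv : cnt v = c := (hcnt v List.mem_cons_self).trans hc
      have hlen_t : t.length ≤ n := by
        have h1 : (v :: s').length = c + t.length := by
          rw [hsplit]; simp
        simp only [List.length_cons] at hlen h1
        omega
      have hfresh_t : ∀ (m : Nat) (a : Int), a ∈ t → a ∉ (found ++ [v]) ++ List.replicate m v := by
        intro m a ha
        have h1 : a ∉ found := hfresh a (htsub a ha)
        have h2 : a ≠ v := fun h => hvt (h ▸ ha)
        simp [List.mem_append, List.mem_replicate, h1, h2]
      have hcnt_t : ∀ e ∈ t, cnt e = t.count e := by
        intro e he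
        rw [hcnt e (htsub e he), hcount_t e he]
      simp only [pvELoop, pvBLoop, hvf, if_false, hcv]
      by_cases hc4 : c = 4
      · subst hc4
        norm_num
      · by_cases hc3 : c = 3
        · subst hc3
          norm_num
          rw [hs', show (3 : Nat) - 1 = 2 from rfl,
            pv_eloop_skip v 2 cnt t _ (found ++ [v]) (by simp)]
          exact ih t cnt _ _ hlen_t htsort (fun a ha => hfresh_t 2 a ha) hcnt_t
        · by_cases hc2 : c = 2
          · subst hc2
            norm_num
            rw [hs', show (2 : Nat) - 1 = 1 from rfl,
              pv_eloop_skip v 1 cnt t _ (found ++ [v]) (by simp)]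
            exact ih t cnt _ _ hlen_t htsort (fun a ha => hfresh_t 1 a ha) hcnt_t
          · have hne3 : ¬ ((c : Int) - 1 = 3) := by intro h; apply hc4; omega
            have hne2 : ¬ ((c : Int) - 1 = 2) := by intro h; apply hc3; omega
            have hne1 : ¬ ((c : Int) - 1 = 1) := by intro h; apply hc2; omega
            have hb4 : ¬ ((c : Int) = 4) := by intro h; apply hc4; omega
            have hb3 : ¬ ((c : Int) = 3) := by intro h; apply hc3; omega
            have hb2 : ¬ ((c : Int) = 2) := by intro h; apply hc2; omega
            rw [if_neg hne3, if_neg hne2, if_neg hne1, if_neg hb4, if_neg hb3, if_neg hb2]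
            rw [hs', pv_eloop_skip v (c - 1) cnt t _ (found ++ [v]) (by simp)]
            exact ih t cnt _ _ hlen_t htsort (fun a ha => hfresh_t (c - 1) a ha) hcnt_t

lemma pv_last_eq (h : List Int) (hne : h ≠ []) :
    (PySem.List.pyGet? h (-1)).getD 0 = h.getD (h.length - 1) 0 := by
  have hpos : 0 < h.length := List.length_pos_iff.mpr hne
  simp [PySem.List.pyGet?, PySem.List.pyIdx?, List.getD]
  rw [if_pos (show 1 ≤ h.length by omega)]
  simp

-- ===== VERDICT (by name: the statement is the Claim_ definition above) =====
theorem num_of_a_kind_spec : Claim_equal_num_of_a_kind := by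
  intro hand _ hpre
  unfold Spec_num_of_a_kind num_of_a_kind num_of_a_kind_alt
  have hlen := PySem.List.length_sorted hand id false
  have hne : PySem.List.sorted hand id ≠ [] := by
    intro h0
    apply hpre
    rw [h0] at hlen
    exact List.length_eq_zero_iff.mp hlen.symm
  have hsort : (PySem.List.sorted hand id).Pairwise (· ≤ ·) := by
    simpa using PySem.List.sorted_pairwise hand id
  have hA : pvALoop (PySem.List.sorted hand id)
      (List.range (PySem.List.sorted hand id).length) [] [] =
      pvELoop (PySem.List.sorted hand id).count (PySem.List.sorted hand id) [] [] := by
    rw [pv_aloop_eq_eloop (PySem.List.sorted hand id) _ [] []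
        (fun x hx => List.mem_range.mp hx), pv_map_getD_range]
  have hB : ((PySem.List.sorted hand id).foldl
      (fun d v => d.insert v (d.getD v 0 + 1)) PySem.Dict.empty).items =
      (PySem.Set.ofList (PySem.List.sorted hand id)).map
        (fun k => (k, ((PySem.List.sorted hand id).count k : Int))) := by
    rw [PySem.Dict.foldl_insert_getD_add_one_eq_counter, PySem.Dict.items_counter]
  have hmain := pv_main (PySem.List.sorted hand id).length (PySem.List.sorted hand id)
    (PySem.List.sorted hand id).count [] [] le_rfl hsort (by simp) (fun e _ => rfl)
  simp only [hA, hB, hmain]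
  cases pvBLoop ((PySem.Set.ofList (PySem.List.sorted hand id)).map
      (fun k => (k, ((PySem.List.sorted hand id).count k : Int)))) [] with
  | inl v => rfl
  | inr v =>
    by_cases hv : v.length = 0
    · simp only [hv, if_true, if_pos]
      rw [pv_last_eq _ hne]
    · simp only [hv, if_false, if_neg hv]
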